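-- pv_equiv track=rewrite | github.com/sresis/practice-problems | directions/directions.py | return_directions
-- ===== SOURCE A (Python) =====
-- def return_directions(directions):
--     """Returns list of directions removing duplicates."""
--     pairs = {'NORTH': 'SOUTH', 'SOUTH': 'NORTH', 'EAST': 'WEST', 'WEST': 'EAST'}
--     stack = []
--     for i in range(len(directions)):
--         if not stack or stack[-1] != pairs[directions[i]]:
--             stack.append(directions[i])
--         else:
--             stack.pop()
--
--     return stack
-- ===== SOURCE B (Python) =====
-- def return_directions(directions):
--     """Returns list of directions removing duplicates.
--
--     Fixed-point reduction: repeatedly scan left-to-right and delete the first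
--     adjacent pair (x, y) with x == pairs.get(y) (opposite directions, detected
--     by looking up only the SECOND element), until a scan finds no such pair.
--     """
--     pairs = {'NORTH': 'SOUTH', 'SOUTH': 'NORTH', 'EAST': 'WEST', 'WEST': 'EAST'}
--     result = list(directions)
--     while True:
--         for i in range(len(result) - 1):
--             if pairs.get(result[i + 1]) == result[i]:
--                 del result[i:i + 2]
--                 break
--         else:
--             return result
-- ===== Notes on version B (the rewrite author's own statement) =====
-- stated objective: alternative
-- what changed: B replaces A's single-pass stack with an iterative fixed-point reduction: it repeatedly rescans the list and deletes the first adjacent opposite pair (detected via pairs.get on the second element) until a full scan removes nothing; confluence of this rewriting gives A's stack result.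
-- outside the precondition, e.g. on return_directions(['NORTH', 'SOUTH', 'x']): A returns ['x'], B returns ['x']; on return_directions(['NORTH', 'x']): A raises KeyError, B returns ['NORTH', 'x']
import Mathlib
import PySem

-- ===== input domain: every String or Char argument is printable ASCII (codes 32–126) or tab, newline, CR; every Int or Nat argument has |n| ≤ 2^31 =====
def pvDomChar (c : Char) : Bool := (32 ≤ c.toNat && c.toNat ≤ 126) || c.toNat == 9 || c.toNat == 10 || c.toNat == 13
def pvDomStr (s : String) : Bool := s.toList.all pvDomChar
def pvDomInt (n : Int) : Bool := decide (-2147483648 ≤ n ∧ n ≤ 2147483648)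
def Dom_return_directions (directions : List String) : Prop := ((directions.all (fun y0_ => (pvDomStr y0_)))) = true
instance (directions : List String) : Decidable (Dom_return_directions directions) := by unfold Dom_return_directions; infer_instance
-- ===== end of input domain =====

-- B replaces A's single-pass stack with an iterative fixed-point reduction (repeatedly delete the first
-- adjacent opposite pair until none remains); the ports are proved to agree, with Pre_ excluding lists on
-- which Python A can raise KeyError (a non-direction string after the first position).


-- ===== PORT A =====
def pairsA : PySem.Dict String String :=
  PySem.Dict.ofList [("NORTH","SOUTH"),("SOUTH","NORTH"),("EAST","WEST"),("WEST","EAST")]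

-- one loop iteration: `if not stack or stack[-1] != pairs[directions[i]]: append else: pop`
-- (pairs[x] is ported as getD with default x; the default is only reached where Python A raises KeyError)
def stepA (stack : List String) (x : String) : List String :=
  if stack = [] ∨ stack.getLast?.getD "" ≠ pairsA.getD x x then stack ++ [x] else stack.dropLast

def return_directions (directions : List String) : List String :=
  directions.foldl stepA []

-- ===== PORT B =====
def pairsB : PySem.Dict String String :=
  PySem.Dict.ofList [("NORTH","SOUTH"),("SOUTH","NORTH"),("EAST","WEST"),("WEST","EAST")]

-- one scan of Source B's inner for-loop: find the first adjacent pair (x, y) with pairs.get(y) == x and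
-- return the list with that pair deleted; none = the loop's `else` (no pair found)
def scanOnce : List String → Option (List String)
  | a :: b :: t => if pairsB.get? b = some a then some t else (scanOnce (b :: t)).map (a :: ·)
  | _ => none

-- termination of the while-loop: a successful scan shortens the list (cited by reduceFix's decreasing_by)
lemma scanOnce_length : ∀ (xs ys : List String), scanOnce xs = some ys → ys.length < xs.length := by
  intro xs
  induction xs with
  | nil => intro ys h; simp [scanOnce] at h
  | cons a t ih =>
    cases t with
    | nil => intro ys h; simp [scanOnce] at h
    | cons b t' =>
      intro ys h
      simp only [scanOnce] at h
      split at h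
      · cases h; simp
      · rcases Option.map_eq_some_iff.mp h with ⟨zs, hz, rfl⟩
        have := ih zs hz
        simpa using Nat.succ_lt_succ this

-- Source B's `while True` loop: rescan and delete until no pair is found
def reduceFix (xs : List String) : List String :=
  match h : scanOnce xs with
  | some ys => reduceFix ys
  | none => xs
termination_by xs.length
decreasing_by exact scanOnce_length _ _ h

def return_directions_alt (directions : List String) : List String :=
  reduceFix directions

-- ===== PRECONDITION & SPEC =====
-- Pre_ requires every element after the first to be one of the four direction keys: the first element is
-- never looked up in `pairs` (the stack is empty there), so inside Pre_ A never raises; a non-key string in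
-- the tail makes A raise KeyError whenever the stack is nonempty when it is reached, which depends on run
-- state, so Pre_ conservatively excludes all such lists (on a few of them A still returns — see the cites).
def Pre_return_directions (directions : List String) : Prop :=
  ∀ s ∈ directions.tail, s ∈ (["NORTH", "SOUTH", "EAST", "WEST"] : List String)
instance (directions : List String) : Decidable (Pre_return_directions directions) := by
  unfold Pre_return_directions; infer_instance

def pvWitness_return_directions : List String := ["NORTH", "EAST", "WEST", "WEST"]

def Spec_return_directions (directions : List String) (out : List String) : Prop := out = return_directions_alt directions
instance (directions : List String) (out : List String) : Decidable (Spec_return_directions directions out) := by unfold Spec_return_directions; infer_instance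

-- ===== CLAIM (what is proved, stated in full; the proofs are below) =====
def Claim_equal_return_directions : Prop := ∀ (directions : List String), Dom_return_directions directions → Pre_return_directions directions → Spec_return_directions directions (return_directions directions)

-- ===== LEMMAS AND PROOFS =====

-- "no adjacent pair cancels under A's test": adjacent (p, q) always has p ≠ pairs.getD q q
def RA (p q : String) : Prop := p ≠ pairsA.getD q q

-- the concrete key facts about the four directions
lemma key_fact {a b : String} (h : pairsB.get? b = some a) :
    pairsA.getD b b = a ∧ pairsA.getD a a = b := by
  have hk : pairsB.keys = ["NORTH", "SOUTH", "EAST", "WEST"] := by decide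
  have hmem : b ∈ pairsB.keys := by
    by_contra hb
    rw [(PySem.Dict.get?_eq_none_iff_not_mem_keys pairsB b).mpr hb] at h
    simp at h
  rw [hk] at hmem
  fin_cases hmem
  · rw [show pairsB.get? "NORTH" = some "SOUTH" from rfl] at h
    obtain rfl := Option.some.inj h; exact ⟨rfl, rfl⟩
  · rw [show pairsB.get? "SOUTH" = some "NORTH" from rfl] at h
    obtain rfl := Option.some.inj h; exact ⟨rfl, rfl⟩
  · rw [show pairsB.get? "EAST" = some "WEST" from rfl] at h
    obtain rfl := Option.some.inj h; exact ⟨rfl, rfl⟩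
  · rw [show pairsB.get? "WEST" = some "EAST" from rfl] at h
    obtain rfl := Option.some.inj h; exact ⟨rfl, rfl⟩

lemma key_mem {b : String} (hb : b ∈ (["NORTH", "SOUTH", "EAST", "WEST"] : List String)) :
    pairsB.get? b = some (pairsA.getD b b) := by
  fin_cases hb <;> rfl

lemma stepA_nil (x : String) : stepA [] x = [x] := by simp [stepA]

lemma stepA_push {x : String} {s : List String}
    (h : s.getLast?.getD "" ≠ pairsA.getD x x) : stepA s x = s ++ [x] := by
  simp [stepA, h]

lemma stepA_pop {a x : String} {t : List String}
    (h : (a :: t).getLast?.getD "" = pairsA.getD x x) :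
    stepA (a :: t) x = (a :: t).dropLast := by
  simp [stepA, h]

lemma stepA_pop' {x : String} {s : List String} (hne : s ≠ [])
    (h : s.getLast?.getD "" = pairsA.getD x x) : stepA s x = s.dropLast := by
  simp [stepA, hne, h]

-- in a chain, the element before y does not cancel against y under A's test
lemma chainRA_last {m : List String} {w y : String} {r : List String}
    (h : List.IsChain RA ((m ++ [w]) ++ y :: r)) : w ≠ pairsA.getD y y := by
  have hj := (List.isChain_append.mp h).2.2
  exact hj w (by rw [List.getLast?_concat]; rfl) y rfl

-- extract the junction fact "last element does not cancel against y" from a chain over l ++ y :: r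
lemma chain_junction {c y : String} {s' r : List String}
    (h : List.IsChain RA ((c :: s') ++ y :: r)) :
    (c :: s').getLast?.getD "" ≠ pairsA.getD y y := by
  have hj := (List.isChain_append.mp h).2.2
  have hl : (c :: s').getLast? = some ((c :: s').getLast (by simp)) :=
    List.getLast?_eq_some_getLast (by simp)
  have := hj _ (by rw [hl]; rfl) y rfl
  rw [hl]
  exact this

-- stepA preserves the no-adjacent-cancel invariant of the stack
lemma chain_stepA {s : List String} (h : List.IsChain RA s) (x : String) :
    List.IsChain RA (stepA s x) := by
  rcases s with _ | ⟨c, s'⟩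
  · rw [stepA_nil]; exact List.isChain_singleton x
  · by_cases hc : (c :: s').getLast?.getD "" = pairsA.getD x x
    · rw [stepA_pop hc]
      exact h.dropLast
    · rw [stepA_push hc]
      refine h.append (List.isChain_singleton x) ?_
      intro p hp q hq
      simp only [List.head?_cons, Option.mem_def, Option.some.injEq] at hq
      subst hq
      have hp' : (c :: s').getLast?.getD "" = p := by
        rw [show (c :: s').getLast? = some p from hp]; rfl
      rw [← hp']
      exact hc

-- a list with no cancelling adjacent pair folds to itself
lemma foldl_of_chain : ∀ (xs s : List String), List.IsChain RA (s ++ xs) →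
    List.foldl stepA s xs = s ++ xs := by
  intro xs
  induction xs with
  | nil => intro s _; simp
  | cons x r ih =>
    intro s h
    have hstep : stepA s x = s ++ [x] := by
      rcases s with _ | ⟨c, s'⟩
      · exact stepA_nil x
      · exact stepA_push (chain_junction h)
    rw [List.foldl_cons, hstep, ih (s ++ [x]) (by simpa using h)]
    simp

-- scanOnce = none means no adjacent pair cancels (given the tail elements are keys)
lemma chain_of_scanOnce_none : ∀ (xs : List String),
    (∀ s ∈ xs.tail, s ∈ (["NORTH", "SOUTH", "EAST", "WEST"] : List String)) →
    scanOnce xs = none → List.IsChain RA xs := by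
  intro xs
  induction xs with
  | nil => intro _ _; simp
  | cons a t ih =>
    cases t with
    | nil => intro _ _; simp
    | cons b t' =>
      intro htail h
      simp only [scanOnce] at h
      split at h
      · exact absurd h (by simp)
      · rename_i hcond
        rw [Option.map_eq_none_iff] at h
        have hb : b ∈ (["NORTH", "SOUTH", "EAST", "WEST"] : List String) := htail b (by simp)
        have hR : RA a b := by
          intro heq
          exact hcond (by rw [key_mem hb, heq])
        exact List.isChain_cons_cons.mpr ⟨hR, ih (fun s hs => htail s (List.mem_cons_of_mem _ hs)) h⟩

-- elements of a scanned result come from the scanned list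
lemma scanOnce_subset : ∀ (xs ys : List String), scanOnce xs = some ys → ∀ e ∈ ys, e ∈ xs := by
  intro xs
  induction xs with
  | nil => intro ys h; simp [scanOnce] at h
  | cons a t ih =>
    cases t with
    | nil => intro ys h; simp [scanOnce] at h
    | cons b t' =>
      intro ys h e he
      simp only [scanOnce] at h
      split at h
      · cases h; simp [he]
      · rcases Option.map_eq_some_iff.mp h with ⟨zs, hz, rfl⟩
        rcases List.mem_cons.mp he with rfl | he'
        · simp
        · exact List.mem_cons_of_mem _ (ih zs hz e he')

-- deleting a pair preserves Pre_ (the tail-elements-are-keys invariant)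
lemma scanOnce_pre : ∀ (xs ys : List String),
    (∀ s ∈ xs.tail, s ∈ (["NORTH", "SOUTH", "EAST", "WEST"] : List String)) →
    scanOnce xs = some ys →
    ∀ s ∈ ys.tail, s ∈ (["NORTH", "SOUTH", "EAST", "WEST"] : List String) := by
  intro xs ys hpre h
  cases xs with
  | nil => simp [scanOnce] at h
  | cons a t =>
    cases t with
    | nil => simp [scanOnce] at h
    | cons b t' =>
      simp only [scanOnce] at h
      split at h
      · cases h
        intro s hs
        exact hpre s (List.mem_cons_of_mem _ (List.mem_of_mem_tail hs))
      · rcases Option.map_eq_some_iff.mp h with ⟨zs, hz, rfl⟩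
        intro s hs
        exact hpre s (scanOnce_subset _ _ hz s (by simpa using hs))

-- KEY LEMMA: deleting the first cancelling adjacent pair does not change A's fold,
-- for any starting stack satisfying the invariant
lemma foldl_scanOnce : ∀ (xs ys : List String), scanOnce xs = some ys →
    ∀ s : List String, List.IsChain RA s →
    List.foldl stepA s xs = List.foldl stepA s ys := by
  intro xs
  induction xs with
  | nil => intro ys h; simp [scanOnce] at h
  | cons a t ih =>
    cases t with
    | nil => intro ys h; simp [scanOnce] at h
    | cons b t' =>
      intro ys h s hs
      simp only [scanOnce] at h
      split at h
      · -- the pair (a, b) cancels: show stepA (stepA s a) b = s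
        rename_i hcond
        cases h
        obtain ⟨hba, hab⟩ := key_fact hcond
        have hkey : stepA (stepA s a) b = s := by
          rcases List.eq_nil_or_concat' s with rfl | ⟨l, z, rfl⟩
          · rw [stepA_nil, stepA_pop (by simp [hba])]
            rfl
          · have hgl : (l ++ [z]).getLast?.getD "" = z := by
              rw [List.getLast?_concat]
              rfl
            by_cases hz : z = pairsA.getD a a
            · -- a pops the stack's top z (which must be b); then b is pushed back
              rw [hab] at hz
              subst hz
              have hinner : stepA (l ++ [z]) a = l := by
                rw [stepA_pop' (by simp) (by rw [hgl, hab]), List.dropLast_concat]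
              rw [hinner]
              rcases List.eq_nil_or_concat' l with rfl | ⟨m, w, rfl⟩
              · rw [stepA_nil]
                rfl
              · rw [stepA_push (by rw [List.getLast?_concat]; exact chainRA_last hs)]
            · -- a is pushed onto the stack; b pops it straight off
              have hinner : stepA (l ++ [z]) a = (l ++ [z]) ++ [a] :=
                stepA_push (by rw [hgl]; exact hz)
              rw [hinner,
                stepA_pop' (by simp) (by rw [List.getLast?_concat, hba]; rfl),
                List.dropLast_concat]
        calc List.foldl stepA s (a :: b :: t')
            = List.foldl stepA (stepA (stepA s a) b) t' := rfl
          _ = List.foldl stepA s t' := by rw [hkey]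
      · -- the first pair does not cancel: recurse on the tail
        rcases Option.map_eq_some_iff.mp h with ⟨zs, hz, rfl⟩
        calc List.foldl stepA s (a :: b :: t')
            = List.foldl stepA (stepA s a) (b :: t') := rfl
          _ = List.foldl stepA (stepA s a) zs := ih zs hz _ (chain_stepA hs a)
          _ = List.foldl stepA s (a :: zs) := rfl

-- main: A's fold equals B's fixed-point reduction on Pre_
lemma main_eq : ∀ (n : ℕ) (xs : List String), xs.length ≤ n →
    (∀ s ∈ xs.tail, s ∈ (["NORTH", "SOUTH", "EAST", "WEST"] : List String)) →
    List.foldl stepA [] xs = reduceFix xs := by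
  intro n
  induction n with
  | zero =>
    intro xs hlen _
    have hnil : xs = [] := List.eq_nil_of_length_eq_zero (Nat.le_zero.mp hlen)
    subst hnil
    rw [reduceFix]
    rfl
  | succ n ih =>
    intro xs hlen hpre
    rw [reduceFix]
    cases h : scanOnce xs with
    | none =>
      exact foldl_of_chain xs [] (chain_of_scanOnce_none xs hpre h)
    | some ys =>
      have h1 : List.foldl stepA [] xs = List.foldl stepA [] ys :=
        foldl_scanOnce xs ys h [] (by simp)
      have h2 := scanOnce_length xs ys h
      rw [h1]
      exact ih ys (by omega) (scanOnce_pre xs ys hpre h)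

-- ===== VERDICT (by name: the statement is the Claim_ definition above) =====
theorem return_directions_spec : Claim_equal_return_directions := by
  intro ds _ hpre
  unfold Spec_return_directions return_directions return_directions_alt
  exact main_eq ds.length ds le_rfl hpre
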